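-- pv_equiv track=rewrite | github.com/joffenhopland/introduction-to-python-programming-and-data-structures | obligatoriske_oppgaver_python_2/Exercise16_13_start.py | get_right_most_lowest_point
-- ===== SOURCE A (Python) =====
-- def get_right_most_lowest_point(points):
--     right_most_index = 0
--     right_most_X = points[0][0]
--     right_most_Y = points[0][1]
--
--     for i in range(len(points)):
--         if right_most_Y > points[i][1]:
--             right_most_Y = points[i][1]
--             right_most_X = points[i][0]
--             right_most_index = i
--         elif right_most_Y == points[i][1] and right_most_X < points[i][0]:
--             right_most_X = points[i][0]
--             right_most_index = i
--
--     return points[right_most_index]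
-- ===== SOURCE B (Python) =====
-- def get_right_most_lowest_point(points):
--     return sorted(points, key=lambda p: (p[1], -p[0]))[0]
-- ===== Notes on version B (the rewrite author's own statement) =====
-- stated objective: alternative
-- what changed: Replaces the explicit index-tracking accumulator loop by a stable sort on the key (y, -x) and taking the first element of the sorted list.
import Mathlib
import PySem

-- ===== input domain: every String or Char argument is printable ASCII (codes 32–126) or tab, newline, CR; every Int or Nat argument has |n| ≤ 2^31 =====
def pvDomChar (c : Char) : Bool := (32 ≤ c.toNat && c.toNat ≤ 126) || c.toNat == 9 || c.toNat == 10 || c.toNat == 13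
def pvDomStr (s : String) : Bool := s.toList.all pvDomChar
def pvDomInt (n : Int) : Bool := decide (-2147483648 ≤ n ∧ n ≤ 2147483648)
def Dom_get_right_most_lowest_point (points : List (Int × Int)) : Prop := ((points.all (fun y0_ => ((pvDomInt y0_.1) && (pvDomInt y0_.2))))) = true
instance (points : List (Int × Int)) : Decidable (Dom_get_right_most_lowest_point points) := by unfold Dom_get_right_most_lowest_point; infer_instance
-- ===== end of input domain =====

-- B replaces A's index-tracking accumulator loop by a stable sort on key (y, -x) and takes the head; alternative decomposition, not faster.


-- ===== PORT A =====
-- A's loop body; state s = (right_most_index, right_most_X, right_most_Y), i the loop index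
def pvStepA (points : List (Int × Int)) (s : Int × Int × Int) (i : Int) : Int × Int × Int :=
  let pi := PySem.List.pyGetD points i (0, 0)
  if s.2.2 > pi.2 then (i, pi.1, pi.2)
  else if s.2.2 == pi.2 && s.2.1 < pi.1 then (i, pi.1, s.2.2)
  else s

-- literal transliteration of A's accumulator loop
def get_right_most_lowest_point (points : List (Int × Int)) : Int × Int :=
  let p0 := PySem.List.pyGetD points 0 (0, 0)
  let st := (PySem.List.pyRange 0 (PySem.List.len points)).foldl (pvStepA points) (0, p0.1, p0.2)
  PySem.List.pyGetD points st.1 (0, 0)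

-- ===== PORT B =====
-- literal transliteration of Source B: sorted(points, key=lambda p: (p[1], -p[0]))[0]
def get_right_most_lowest_point_alt (points : List (Int × Int)) : Int × Int :=
  PySem.List.pyGetD (PySem.List.sorted2 points (fun p => p.2) (fun p => -p.1)) 0 (0, 0)

-- ===== PRECONDITION & SPEC =====
-- Pre_ excludes exactly the empty list, on which both A (points[0]) and B ([0]) raise IndexError.
def Pre_get_right_most_lowest_point (points : List (Int × Int)) : Prop := points ≠ []
instance (points : List (Int × Int)) : Decidable (Pre_get_right_most_lowest_point points) := by unfold Pre_get_right_most_lowest_point; infer_instance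
def pvWitness_get_right_most_lowest_point : (List (Int × Int)) := ([(1, 2), (3, 2), (0, 5)])

def Spec_get_right_most_lowest_point (points : List (Int × Int)) (out : Int × Int) : Prop := out = get_right_most_lowest_point_alt points
instance (points : List (Int × Int)) (out : Int × Int) : Decidable (Spec_get_right_most_lowest_point points out) := by unfold Spec_get_right_most_lowest_point; infer_instance

-- ===== CLAIM (what is proved, stated in full; the proofs are below) =====
def Claim_equal_get_right_most_lowest_point : Prop := ∀ (points : List (Int × Int)), Dom_get_right_most_lowest_point points → Pre_get_right_most_lowest_point points → Spec_get_right_most_lowest_point points (get_right_most_lowest_point points)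

-- ===== LEMMAS AND PROOFS =====

-- "r is a (value-)minimal point under key (y, -x)": minimal y, and maximal x among that y
def pvIsBest (r : Int × Int) (points : List (Int × Int)) : Prop :=
  ∀ q ∈ points, r.2 ≤ q.2 ∧ (q.2 = r.2 → q.1 ≤ r.1)

-- any two members that are both best have equal value
lemma pvBest_unique {r m : Int × Int} {points : List (Int × Int)}
    (hr : r ∈ points) (hm : m ∈ points)
    (hbr : pvIsBest r points) (hbm : pvIsBest m points) : r = m := by
  obtain ⟨h1, h2⟩ := hbr m hm
  obtain ⟨h3, h4⟩ := hbm r hr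
  have hy : r.2 = m.2 := le_antisymm h1 h3
  have hx : r.1 = m.1 := le_antisymm (h4 hy) (h2 hy.symm)
  exact Prod.ext hx hy

-- the strict "before" comparison sorted2 uses (lex on (y, -x))
def pvLt (a b : Int × Int) : Bool :=
  decide (a.2 < b.2) || (!decide (b.2 < a.2) && decide (-a.1 < -b.1))

lemma pvLt_irrefl (a : Int × Int) : pvLt a a = false := by
  simp [pvLt]

lemma pvLt_trans {a b c : Int × Int} (h1 : pvLt a b = true) (h2 : pvLt b c = true) :
    pvLt a c = true := by
  simp only [pvLt, Bool.or_eq_true, Bool.and_eq_true, Bool.not_eq_true',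
    decide_eq_true_eq, decide_eq_false_iff_not] at *
  omega

-- invariant: the head of acc (when acc is nonempty) is pvLt-minimal in acc
def pvMinHead (acc : List (Int × Int)) : Prop :=
  ∀ hh, acc.head? = some hh → ∀ z ∈ acc, pvLt z hh = false

lemma pvMinHead_insertBy (x : Int × Int) (acc : List (Int × Int)) (h : pvMinHead acc) :
    pvMinHead (PySem.List.insertBy pvLt x acc) := by
  cases acc with
  | nil =>
    intro hh hhead z hz
    simp [PySem.List.insertBy] at hhead hz
    subst hhead; subst hz; exact pvLt_irrefl _
  | cons y ys =>
    have hmem_y : ∀ z ∈ y :: ys, pvLt z y = false := fun z hz => h y rfl z hz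
    by_cases hxy : pvLt x y = true
    · intro hh hhead z hz
      simp [PySem.List.insertBy, hxy] at hhead hz
      subst hhead
      have hnot : ∀ z', pvLt z' y = false → pvLt z' x = false := by
        intro z' hzy
        cases hb : pvLt z' x with
        | false => rfl
        | true => exact absurd (pvLt_trans hb hxy) (by simp [hzy])
      rcases hz with hz | hz | hz
      · rw [hz]; exact pvLt_irrefl _
      · rw [hz]; exact hnot y (hmem_y y List.mem_cons_self)
      · exact hnot z (hmem_y z (List.mem_cons_of_mem _ hz))
    · have hxy' : pvLt x y = false := by revert hxy; cases pvLt x y <;> simp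
      intro hh hhead z hz
      simp [PySem.List.insertBy, hxy'] at hhead hz
      subst hhead
      rcases hz with hz | hz
      · rw [hz]; exact pvLt_irrefl _
      · rw [PySem.List.mem_insertBy] at hz
        rcases hz with hz | hz
        · rw [hz]; exact hxy'
        · exact hmem_y z (List.mem_cons_of_mem _ hz)

lemma pvMinHead_foldl (xs acc : List (Int × Int)) (h : pvMinHead acc) :
    pvMinHead (xs.foldl (fun acc x => PySem.List.insertBy pvLt x acc) acc) := by
  induction xs generalizing acc with
  | nil => exact h
  | cons x xs ih => exact ih _ (pvMinHead_insertBy x acc h)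

lemma pvSorted2_eq_foldl (points : List (Int × Int)) :
    PySem.List.sorted2 points (fun p => p.2) (fun p => -p.1) =
      points.foldl (fun acc x => PySem.List.insertBy pvLt x acc) [] := by
  rfl

-- B's head is best and a member
lemma pvB_best {points : List (Int × Int)} {m : Int × Int} {t : List (Int × Int)}
    (h : PySem.List.sorted2 points (fun p => p.2) (fun p => -p.1) = m :: t) :
    m ∈ points ∧ pvIsBest m points := by
  have hperm := PySem.List.sorted2_perm points (fun p => p.2) (fun p => -p.1) false
  rw [h] at hperm
  constructor
  · exact hperm.mem_iff.mp List.mem_cons_self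
  · intro q hq
    have hq' : q ∈ m :: t := hperm.mem_iff.mpr hq
    have hmin : pvMinHead (m :: t) := by
      rw [← h, pvSorted2_eq_foldl]
      exact pvMinHead_foldl _ _ (by intro hh hhead z hz; simp at hhead)
    have := hmin m rfl q hq'
    simp only [pvLt, Bool.or_eq_false_iff, Bool.and_eq_false_iff, Bool.not_eq_false',
      decide_eq_false_iff_not, decide_eq_true_eq] at this
    omega

-- A's loop invariant, pushed through the remaining range [k, n)
lemma pvLoopA (points : List (Int × Int)) :
    ∀ (d k : Nat) (s : Int × Int × Int), points.length - k = d → k ≤ points.length →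
    0 ≤ s.1 → s.1 < points.length →
    PySem.List.pyGetD points s.1 (0, 0) = (s.2.1, s.2.2) →
    (∀ q ∈ points.take k, s.2.2 ≤ q.2 ∧ (q.2 = s.2.2 → q.1 ≤ s.2.1)) →
    (let u := (PySem.List.pyRange (k : Int) (points.length : Int)).foldl (pvStepA points) s
     0 ≤ u.1 ∧ u.1 < points.length ∧
     PySem.List.pyGetD points u.1 (0, 0) = (u.2.1, u.2.2) ∧ pvIsBest (u.2.1, u.2.2) points) := by
  intro d
  induction d with
  | zero =>
    intro k s hd hk h0 h1 h2 h3
    have hkn : k = points.length := by omega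
    have hempty : PySem.List.pyRange (k : Int) (points.length : Int) = [] := by
      rw [hkn]; simp [PySem.List.pyRange]
    rw [hempty]
    refine ⟨h0, h1, h2, ?_⟩
    intro q hq
    exact h3 q (by rw [hkn]; simpa using hq)
  | succ d ih =>
    intro k s hd hk h0 h1 h2 h3
    have hklt : (k : Int) < (points.length : Int) := by exact_mod_cast (by omega : k < points.length)
    rw [PySem.List.pyRange_one_cons hklt, List.foldl_cons]
    have hkn : k < points.length := by omega
    have hget : PySem.List.pyGetD points (k : Int) (0, 0) = points[k] := by
      rw [PySem.List.pyGetD_eq_getElem points (0, 0) (by positivity) (by exact_mod_cast hkn)]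
      simp
    have htake : points.take (k + 1) = points.take k ++ [points[k]] := by
      rw [List.take_add_one]
      simp [List.getElem?_eq_getElem hkn]
    -- the new state after processing index k
    have hstep : ∀ (s' : Int × Int × Int), s' = pvStepA points s (k : Int) →
        0 ≤ s'.1 ∧ s'.1 < points.length ∧
        PySem.List.pyGetD points s'.1 (0, 0) = (s'.2.1, s'.2.2) ∧
        (∀ q ∈ points.take (k + 1), s'.2.2 ≤ q.2 ∧ (q.2 = s'.2.2 → q.1 ≤ s'.2.1)) := by
      intro s' hs'
      simp only [pvStepA, hget] at hs'
      by_cases hb1 : s.2.2 > (points[k]).2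
      · rw [if_pos hb1] at hs'
        subst hs'
        refine ⟨?_, ?_, ?_, ?_⟩ <;> dsimp only
        · positivity
        · exact_mod_cast hkn
        · rw [hget]
        · intro q hq
          rw [htake] at hq
          rcases List.mem_append.mp hq with hq | hq
          · have h3q := h3 q hq
            refine ⟨by omega, fun hqe => ?_⟩
            exfalso; omega
          · simp at hq; rw [hq]; simp
      · rw [if_neg hb1] at hs'
        by_cases hb2 : (s.2.2 == (points[k]).2 && decide (s.2.1 < (points[k]).1)) = true
        · rw [if_pos hb2] at hs'
          subst hs'
          simp only [Bool.and_eq_true, beq_iff_eq, decide_eq_true_eq] at hb2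
          refine ⟨?_, ?_, ?_, ?_⟩ <;> dsimp only
          · positivity
          · exact_mod_cast hkn
          · rw [hget]
            have h2' : (points[k]).2 = s.2.2 := hb2.1.symm
            calc points[k] = ((points[k]).1, (points[k]).2) := rfl
              _ = ((points[k]).1, s.2.2) := by rw [h2']
          · intro q hq
            rw [htake] at hq
            rcases List.mem_append.mp hq with hq | hq
            · have h3q := h3 q hq
              exact ⟨h3q.1, fun hqe => by have := h3q.2 hqe; omega⟩
            · simp at hq; rw [hq]
              exact ⟨by omega, fun _ => le_rfl⟩
        · rw [if_neg hb2] at hs'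
          subst hs'
          refine ⟨h0, h1, h2, ?_⟩
          intro q hq
          rw [htake] at hq
          rcases List.mem_append.mp hq with hq | hq
          · exact h3 q hq
          · simp at hq; rw [hq]
            simp only [gt_iff_lt, not_lt] at hb1
            simp only [Bool.and_eq_true, beq_iff_eq, decide_eq_true_eq, not_and, not_lt] at hb2
            exact ⟨hb1, fun hqe => hb2 hqe.symm⟩
    have hnext := hstep (pvStepA points s (k : Int)) rfl
    have hrange : PySem.List.pyRange ((k : Int) + 1) (points.length : Int) =
        PySem.List.pyRange (((k + 1 : Nat) : Int)) (points.length : Int) := by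
      norm_num
    rw [hrange]
    exact ih (k + 1) _ (by omega) (by omega) hnext.1 hnext.2.1 hnext.2.2.1 hnext.2.2.2

-- A's result is best and a member
lemma pvA_best (points : List (Int × Int)) (hne : points ≠ []) :
    get_right_most_lowest_point points ∈ points ∧
    pvIsBest (get_right_most_lowest_point points) points := by
  have hlen : 0 < points.length := List.length_pos_iff.mpr hne
  set p0 := PySem.List.pyGetD points 0 (0, 0) with hp0
  have hmain := pvLoopA points points.length 0 (0, p0.1, p0.2) (by omega) (by omega)
      (by norm_num) (by show (0 : Int) < (points.length : Int); exact_mod_cast hlen)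
      (by simp [hp0]) (by simp)
  simp only [Nat.cast_zero] at hmain
  set u := (PySem.List.pyRange (0 : Int) (points.length : Int)).foldl (pvStepA points)
      (0, p0.1, p0.2) with hu
  obtain ⟨hu0, hu1, hu2, hu3⟩ := hmain
  have hport : get_right_most_lowest_point points = PySem.List.pyGetD points u.1 (0, 0) := by
    simp only [get_right_most_lowest_point, PySem.List.len, hu, hp0]
  have hval : PySem.List.pyGetD points u.1 (0, 0) = points[u.1.toNat]'(by omega) := by
    exact PySem.List.pyGetD_eq_getElem points (0, 0) hu0 hu1
  constructor
  · rw [hport, hval]; exact List.getElem_mem _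
  · rw [hport, hu2]; exact hu3

-- ===== VERDICT (by name: the statement is the Claim_ definition above) =====
theorem get_right_most_lowest_point_spec : Claim_equal_get_right_most_lowest_point := by
  intro points hdom hpre
  unfold Spec_get_right_most_lowest_point
  have hne : points ≠ [] := hpre
  obtain ⟨hmemA, hbestA⟩ := pvA_best points hne
  cases hs : PySem.List.sorted2 points (fun p => p.2) (fun p => -p.1) with
  | nil =>
    exfalso
    have hperm := PySem.List.sorted2_perm points (fun p => p.2) (fun p => -p.1) false
    rw [hs] at hperm
    exact hne (hperm.symm.eq_nil)
  | cons m t =>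
    obtain ⟨hmemB, hbestB⟩ := pvB_best hs
    have : get_right_most_lowest_point_alt points = m := by
      simp [get_right_most_lowest_point_alt, hs, PySem.List.pyGetD, PySem.List.pyGet?, PySem.List.pyIdx?]
    rw [this]
    exact pvBest_unique hmemA hmemB hbestA hbestB
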